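-- pv_equiv track=rewrite | github.com/TheOnlyOneAkira/TP_Reseau | reseau Quentin/simulation.py | parityBit2
-- ===== SOURCE A (Python) =====
-- def parityBit2(message):
--     nb1=0
--     res=''
--     pack=0
--     for i in range(len(message)):
--         res+=message[i]
--         if message[i]=='1':
--             nb1+=1
--         if (i+1)%7==0 and i != 0:
--             res+=str(nb1%2)
--             nb1=0
--             pack+=1
--     if len(message)-7*pack !=0:
--         res+=str(nb1%2)
--     return res
-- ===== SOURCE B (Python) =====
-- def parityBit2(message):
--     parts = []
--     for i in range(0, len(message), 7):
--         chunk = message[i:i+7]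
--         parts.append(chunk + str(chunk.count('1') % 2))
--     return ''.join(parts)
-- ===== Notes on version B (the rewrite author's own statement) =====
-- stated objective: simpler
-- what changed: B walks the message in 7-character slices and appends each chunk plus its own parity bit into a list joined at the end, eliminating A's running nb1 counter, pack counter and the post-loop leftover guard (the final short chunk is handled like a full one).
import Mathlib
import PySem

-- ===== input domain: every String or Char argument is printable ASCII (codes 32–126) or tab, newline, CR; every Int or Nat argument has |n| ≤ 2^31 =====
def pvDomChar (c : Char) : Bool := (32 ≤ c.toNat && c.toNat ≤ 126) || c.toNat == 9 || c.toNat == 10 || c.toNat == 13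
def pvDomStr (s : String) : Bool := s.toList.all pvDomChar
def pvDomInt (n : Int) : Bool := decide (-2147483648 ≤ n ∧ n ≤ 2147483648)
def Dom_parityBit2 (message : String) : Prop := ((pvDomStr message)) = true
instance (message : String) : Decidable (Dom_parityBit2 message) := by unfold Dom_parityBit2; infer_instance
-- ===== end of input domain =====

-- B inserts a parity bit after every 7-character chunk by slicing, replacing A's running
-- counters and the post-loop leftover guard; objective: simpler (same O(n) cost).

-- ===== PORT A =====
-- loop body of A: res += message[i]; count '1's; emit parity after every 7th char
def stepA (chars : List Char) (st : Int × List Char × Int) (i : Int) : Int × List Char × Int :=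
  let ch := PySem.List.pyGetD chars i ' '   -- message[i]; i is always in range in A's loop
  let res := st.2.1 ++ [ch]
  let nb1 := if ch = '1' then st.1 + 1 else st.1
  if PySem.Int.mod (i + 1) 7 = 0 ∧ i ≠ 0 then
    (0, res ++ (PySem.Int.toStr (PySem.Int.mod nb1 2)).toList, st.2.2 + 1)
  else
    (nb1, res, st.2.2)

-- A's trailing 'if len(message)-7*pack != 0: res += str(nb1%2)'
def tailA (n : Int) (st : Int × List Char × Int) : List Char :=
  if n - 7 * st.2.2 ≠ 0 then st.2.1 ++ (PySem.Int.toStr (PySem.Int.mod st.1 2)).toList else st.2.1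

def Acore (chars : List Char) : List Char :=
  tailA (chars.length : Int) ((PySem.List.pyRange 0 (chars.length : Int) 1).foldl (stepA chars) (0, [], 0))

def parityBit2 (message : String) : String := String.ofList (Acore message.toList)

-- ===== PORT B =====
def Bcore (chars : List Char) : List Char :=
  ((PySem.List.pyRange 0 (chars.length : Int) 7).map (fun i =>
      let chunk := PySem.List.slice chars (some i) (some (i + 7))
      chunk ++ (PySem.Int.toStr (PySem.Int.mod ((PySem.List.count chunk '1' : Nat) : Int) 2)).toList)).flatten

def parityBit2_alt (message : String) : String := String.ofList (Bcore message.toList)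

-- ===== PRECONDITION & SPEC =====
def Spec_parityBit2 (message : String) (out : String) : Prop := out = parityBit2_alt message
instance (message : String) (out : String) : Decidable (Spec_parityBit2 message out) := by unfold Spec_parityBit2; infer_instance

-- ===== CLAIM (what is proved, stated in full; the proofs are below) =====
def Claim_equal_parityBit2 : Prop := ∀ (message : String), Dom_parityBit2 message → Spec_parityBit2 message (parityBit2 message)

-- ===== LEMMAS AND PROOFS =====

-- the parity suffix both programs append after a chunk
def par (c : List Char) : List Char :=
  (PySem.Int.toStr (PySem.Int.mod ((List.count '1' c : Nat) : Int) 2)).toList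

-- Bcore in drop/take normal form
def Bnorm (l : List Char) : List Char :=
  ((List.range ((l.length + 6) / 7)).map (fun k =>
      (l.drop (7 * k)).take 7 ++ par ((l.drop (7 * k)).take 7))).flatten

theorem modIff (j : Nat) : PySem.Int.mod ((j : Int)) 7 = 0 ↔ j % 7 = 0 := by
  unfold PySem.Int.mod
  rw [Int.fmod_eq_emod]
  simp
  omega

theorem slice7 (xs : List Char) (j : Nat) :
    PySem.List.slice xs (some (j : Int)) (some ((j : Int) + 7)) = (xs.drop j).take 7 := by
  have h : ((j : Int) + 7) = ((j : Int) + ((7 : Nat) : Int)) := by norm_cast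
  rw [h, PySem.List.slice_natCast_add]

-- A's loop over indices with no parity emission: appends the chars read, counts the ones
theorem no_emit (m : Nat) : ∀ (t : Nat) (chars : List Char) (nb1 : Int) (res : List Char) (pack : Int),
    t + m ≤ chars.length →
    (∀ k, t ≤ k → k < t + m → (k + 1) % 7 ≠ 0) →
    (List.range' t m).foldl (fun st (k : Nat) => stepA chars st (k : Int)) (nb1, res, pack)
      = (nb1 + (List.count '1' ((chars.drop t).take m) : Int), res ++ (chars.drop t).take m, pack) := by
  induction m with
  | zero => intro t chars nb1 res pack _ _; simp
  | succ m ih =>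
    intro t chars nb1 res pack hlen hk
    have ht : t < chars.length := by omega
    have hget : PySem.List.pyGetD chars (t : Int) ' ' = chars[t] := by
      rw [PySem.List.pyGetD_natCast]
      exact List.getD_eq_getElem chars ' ' ht
    have hcond : ¬ (PySem.Int.mod ((t : Int) + 1) 7 = 0 ∧ (t : Int) ≠ 0) := by
      rintro ⟨h1, -⟩
      have he : ((t : Int) + 1) = (((t + 1 : Nat)) : Int) := by push_cast; ring
      rw [he, modIff] at h1
      exact hk t le_rfl (by omega) h1
    rw [List.range'_succ, List.foldl_cons]
    have hstep : stepA chars (nb1, res, pack) (t : Int)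
        = (nb1 + (if chars[t] = '1' then 1 else 0), res ++ [chars[t]], pack) := by
      simp only [stepA, hget, if_neg hcond]
      split_ifs <;> simp
    rw [hstep, ih (t + 1) chars _ _ _ (by omega) (fun k h1 h2 => hk k (by omega) (by omega))]
    have hdt : chars.drop t = chars[t] :: chars.drop (t + 1) := List.drop_eq_getElem_cons ht
    rw [hdt]
    simp only [List.take_succ_cons, List.count_cons, Prod.mk.injEq]
    refine ⟨?_, ?_, by norm_num⟩
    · by_cases hc : chars[t] = '1' <;> simp [hc]
      omega
    · simp [List.append_assoc]

-- affine invariance of A's loop in res and pack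
theorem affine (chars : List Char) (is : List Nat) : ∀ (nb1 : Int) (res : List Char) (pack : Int),
    is.foldl (fun st (k : Nat) => stepA chars st (k : Int)) (nb1, res, pack)
      = ((is.foldl (fun st (k : Nat) => stepA chars st (k : Int)) (nb1, [], 0)).1,
         res ++ (is.foldl (fun st (k : Nat) => stepA chars st (k : Int)) (nb1, [], 0)).2.1,
         pack + (is.foldl (fun st (k : Nat) => stepA chars st (k : Int)) (nb1, [], 0)).2.2) := by
  induction is with
  | nil => intro nb1 res pack; simp
  | cons i is ih =>
    intro nb1 res pack
    simp only [List.foldl_cons]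
    have hstep : ∀ (r : List Char) (p : Int), stepA chars (nb1, r, p) (i : Int)
        = ((stepA chars (nb1, [], 0) (i : Int)).1, r ++ (stepA chars (nb1, [], 0) (i : Int)).2.1,
           p + (stepA chars (nb1, [], 0) (i : Int)).2.2) := by
      intro r p
      simp only [stepA]
      split_ifs <;> simp
    rcases h0 : stepA chars (nb1, [], 0) (i : Int) with ⟨a, b, c⟩
    rw [hstep res pack, h0]
    rw [ih a (res ++ b) (pack + c), ih a b c]
    simp [add_assoc]

-- shifting A's loop body by one full chunk of 7
theorem stepA_shift (c7 rest : List Char) (h : c7.length = 7) (st : Int × List Char × Int) (k : Nat) :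
    stepA (c7 ++ rest) st (((7 + k : Nat)) : Int) = stepA rest st ((k : Nat) : Int) := by
  have hget : PySem.List.pyGetD (c7 ++ rest) (((7 + k : Nat)) : Int) ' '
      = PySem.List.pyGetD rest ((k : Nat) : Int) ' ' := by
    rw [PySem.List.pyGetD_natCast, PySem.List.pyGetD_natCast]
    simp [List.getD, List.getElem?_append_right, h]
  have hcond : (PySem.Int.mod ((((7 + k : Nat)) : Int) + 1) 7 = 0 ∧ (((7 + k : Nat)) : Int) ≠ 0)
      ↔ (PySem.Int.mod (((k : Nat) : Int) + 1) 7 = 0 ∧ ((k : Nat) : Int) ≠ 0) := by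
    have h1 : ((((7 + k : Nat)) : Int) + 1) = (((7 + k + 1 : Nat)) : Int) := by push_cast; ring
    have h2 : (((k : Nat) : Int) + 1) = (((k + 1 : Nat)) : Int) := by push_cast; ring
    rw [h1, h2, modIff, modIff]
    omega
  simp only [stepA, hget]
  rw [if_congr hcond rfl rfl]

theorem tailA_shift (n : Nat) (h7 : 7 ≤ n) (pre : List Char) (st : Int × List Char × Int) :
    tailA (n : Int) (st.1, pre ++ st.2.1, 1 + st.2.2) = pre ++ tailA (((n - 7 : Nat)) : Int) st := by
  unfold tailA
  have hc : ((n : Int) - 7 * (1 + st.2.2) ≠ 0) ↔ ((((n - 7 : Nat)) : Int) - 7 * st.2.2 ≠ 0) := by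
    have h : (((n - 7 : Nat)) : Int) = (n : Int) - 7 := by omega
    rw [h]; constructor <;> intro hx hy <;> apply hx <;> omega
  rw [if_congr hc rfl rfl]
  split_ifs <;> simp

theorem Acore_nil : Acore [] = [] := by decide

theorem Apeel (l : List Char) (hne : l ≠ []) :
    Acore l = l.take 7 ++ par (l.take 7) ++ Acore (l.drop 7) := by
  have hn0 : 0 < l.length := List.length_pos_iff.mpr hne
  have hrange : ∀ (xs : List Char), PySem.List.pyRange 0 ((xs.length : Nat) : Int) 1
      = (List.range' 0 xs.length).map (fun (k : Nat) => (k : Int)) := by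
    intro xs
    rw [PySem.List.pyRange_one]
    simp [List.range_eq_range']
  by_cases h7 : 7 ≤ l.length
  · -- full leading chunk
    have h6 : (6 : Nat) < l.length := by omega
    have hsplit : List.range' 0 l.length = List.range' 0 7 ++ List.range' 7 (l.length - 7) := by
      have h : 7 + (l.length - 7) = l.length := by omega
      calc List.range' 0 l.length = List.range' 0 (7 + (l.length - 7)) := by rw [h]
        _ = _ := by rw [← List.range'_append]
    have htake : l.take 7 = l.take 6 ++ [l[6]] := by
      rw [show (7 : Nat) = 6 + 1 from rfl, List.take_add_one, List.getElem?_eq_getElem h6]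
      rfl
    have hfirst : (List.range' 0 7).foldl (fun st (k : Nat) => stepA l st (k : Int)) ((0 : Int), ([] : List Char), (0 : Int))
        = (0, l.take 7 ++ par (l.take 7), 1) := by
      have h07 : (List.range' 0 7 : List Nat) = List.range' 0 6 ++ [6] := by decide
      rw [h07, List.foldl_append,
          no_emit 6 0 l 0 [] 0 (by omega) (by intro k h1 h2; omega)]
      simp only [List.drop_zero, List.nil_append, List.foldl_cons, List.foldl_nil, zero_add]
      have hget : PySem.List.pyGetD l (((6 : Nat)) : Int) ' ' = l[6] := by
        rw [PySem.List.pyGetD_natCast]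
        exact List.getD_eq_getElem l ' ' h6
      have hcond : PySem.Int.mod ((((6 : Nat)) : Int) + 1) 7 = 0 ∧ (((6 : Nat)) : Int) ≠ 0 := by
        refine ⟨?_, by simp⟩
        have he : ((((6 : Nat)) : Int) + 1) = (((7 : Nat)) : Int) := by norm_num
        rw [he, modIff]
      have hX : (if l[6] = '1' then ((List.count '1' (List.take 6 l) : Nat) : Int) + 1
                 else ((List.count '1' (List.take 6 l) : Nat) : Int))
          = ((List.count '1' (List.take 7 l) : Nat) : Int) := by
        rw [htake, List.count_append]
        by_cases hc : l[6] = '1' <;> simp [hc]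
      simp only [stepA, hget, if_pos hcond, Prod.mk.injEq, hX]
      refine ⟨by norm_num, ?_, by norm_num⟩
      rw [par, htake]
    have hshift : ∀ (st : Int × List Char × Int),
        (List.range' 7 (l.length - 7)).foldl (fun st (k : Nat) => stepA l st (k : Int)) st
          = (List.range' 0 (l.length - 7)).foldl (fun st (k : Nat) => stepA (l.drop 7) st (k : Int)) st := by
      intro st
      have hm : List.range' 7 (l.length - 7) = (List.range' 0 (l.length - 7)).map (fun k => 7 + k) := by
        rw [List.range'_eq_map_range, List.range'_eq_map_range, List.map_map]
        simp
      rw [hm, List.foldl_map]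
      have hfun : (fun (st : Int × List Char × Int) (k : Nat) => stepA l st (((7 + k : Nat)) : Int))
          = (fun (st : Int × List Char × Int) (k : Nat) => stepA (l.drop 7) st ((k : Nat) : Int)) := by
        funext st k
        conv_lhs => rw [← List.take_append_drop 7 l]
        exact stepA_shift _ _ (by rw [List.length_take]; omega) st k
      rw [hfun]
    have hlen' : (l.drop 7).length = l.length - 7 := by simp
    simp only [Acore]
    rw [hrange l, hrange (l.drop 7), List.foldl_map, List.foldl_map, hsplit, List.foldl_append,
        hfirst, hshift, hlen']
    rw [affine (l.drop 7) (List.range' 0 (l.length - 7)) 0 (l.take 7 ++ par (l.take 7)) 1]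
    rw [tailA_shift l.length h7]
  · -- short message: single partial chunk
    have htl : l.take 7 = l := List.take_of_length_le (by omega)
    have hdl : l.drop 7 = [] := List.drop_of_length_le (by omega)
    have hA : Acore l = l ++ par l := by
      simp only [Acore]
      rw [hrange l, List.foldl_map,
          no_emit l.length 0 l 0 [] 0 (by omega) (by intro k h1 h2; omega)]
      simp only [List.drop_zero, List.take_length, List.nil_append, zero_add]
      unfold tailA
      rw [if_pos (by simp; omega)]
      simp [par]
    rw [hA, htl, hdl, Acore_nil]
    simp

theorem pyRange7 (n : Nat) : PySem.List.pyRange 0 ((n : Nat) : Int) 7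
    = (List.range ((n + 6) / 7)).map (fun k => (((7 * k : Nat)) : Int)) := by
  by_cases h0 : n = 0
  · subst h0; simp [PySem.List.pyRange]
  · unfold PySem.List.pyRange
    rw [if_neg (by norm_num), if_pos (by norm_num),
        if_pos (by exact_mod_cast Nat.pos_of_ne_zero h0)]
    have hcnt : (((n : Nat) : Int) - 0 + 7 - 1) / 7 = ((((n + 6) / 7 : Nat)) : Int) := by
      omega
    rw [hcnt, Int.toNat_natCast]
    apply List.map_congr_left
    intro k _
    push_cast; ring

theorem Bnorm_eq (l : List Char) : Bcore l = Bnorm l := by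
  unfold Bcore Bnorm
  rw [pyRange7 l.length, List.map_map]
  congr 1
  apply List.map_congr_left
  intro k _
  simp only [Function.comp_apply, slice7, par, PySem.List.count]

theorem Bnorm_peel (l : List Char) (hne : l ≠ []) :
    Bnorm l = l.take 7 ++ par (l.take 7) ++ Bnorm (l.drop 7) := by
  have hn0 : 0 < l.length := List.length_pos_iff.mpr hne
  unfold Bnorm
  have hq : (l.length + 6) / 7 = (((l.drop 7).length + 6) / 7) + 1 := by
    simp only [List.length_drop]; omega
  rw [hq, List.range_succ_eq_map, List.map_cons, List.flatten_cons, List.map_map]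
  simp only [Nat.mul_zero, List.drop_zero]
  congr 1
  congr 1
  apply List.map_congr_left
  intro k _
  simp only [Function.comp_apply]
  have hd : l.drop (7 * Nat.succ k) = (l.drop 7).drop (7 * k) := by
    rw [List.drop_drop]
    congr 1
    omega
  rw [hd]

theorem core_eq (l : List Char) : Acore l = Bcore l := by
  by_cases hne : l = []
  · subst hne; decide
  · rw [Apeel l hne, core_eq (l.drop 7), Bnorm_eq (l.drop 7), Bnorm_eq l, Bnorm_peel l hne]
termination_by l.length
decreasing_by
  have h : 0 < l.length := List.length_pos_iff.mpr hne
  simp only [List.length_drop]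
  omega

-- ===== VERDICT (by name: the statement is the Claim_ definition above) =====
theorem parityBit2_spec : Claim_equal_parityBit2 := by
  intro message _
  unfold Spec_parityBit2 parityBit2 parityBit2_alt
  rw [core_eq]
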